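-- pv_equiv track=rewrite | github.com/hojoungjang/programming-exercises | 주식/solution.py | solution
-- ===== SOURCE A (Python) =====
-- def solution(prices):
--     profit = 0
--     max_price = float("-inf")
--     for price in prices[::-1]:
--         if price > max_price:
--             max_price = price
--         else:
--             profit += max_price - price
--     return profit
-- ===== SOURCE B (Python) =====
-- def solution(prices):
--     # Left-to-right monotonic stack of (value, run-length); `total` is the
--     # lazily maintained sum of suffix maxima of the prefix seen so far.
--     stack = []
--     total = 0
--     for p in prices:
--         c = 1
--         while stack and stack[-1][0] <= p:
--             v, k = stack.pop()
--             total += (p - v) * k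
--             c += k
--         total += p
--         stack.append((p, c))
--     return total - sum(prices)
-- ===== Notes on version B (the rewrite author's own statement) =====
-- stated objective: alternative
-- what changed: Replaces A's right-to-left scan tracking the running suffix maximum by a left-to-right monotonic stack of (value, run-length) pairs that lazily maintains the sum of suffix maxima of the prefix, returning that sum minus sum(prices).
import Mathlib
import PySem

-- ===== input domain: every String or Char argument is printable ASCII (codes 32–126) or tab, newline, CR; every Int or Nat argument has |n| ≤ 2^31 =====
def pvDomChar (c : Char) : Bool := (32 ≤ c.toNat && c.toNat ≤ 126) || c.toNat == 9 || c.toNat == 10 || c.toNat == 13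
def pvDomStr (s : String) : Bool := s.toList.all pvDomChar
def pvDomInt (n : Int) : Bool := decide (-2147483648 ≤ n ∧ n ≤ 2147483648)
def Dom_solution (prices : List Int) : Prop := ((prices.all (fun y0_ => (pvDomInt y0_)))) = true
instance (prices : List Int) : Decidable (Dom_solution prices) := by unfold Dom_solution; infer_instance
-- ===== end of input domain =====

-- B trades A's right-to-left suffix-max scan for a left-to-right monotonic stack of
-- (value, run-length) pairs lazily maintaining the sum of suffix maxima; alternative algorithm, same cost.

-- ===== PORT A =====
-- A's loop over prices[::-1]; max_price starts as float('-inf'), modelled by Option Int (none = -inf,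
-- where 'price > max_price' is always true and the else-branch is unreachable).
def solutionStepA (st : Int × Option Int) (price : Int) : Int × Option Int :=
  match st.2 with
  | none => (st.1, some price)
  | some m => if price > m then (st.1, some price) else (st.1 + (m - price), some m)

def solution (prices : List Int) : Int :=
  (((PySem.List.slice? prices none none (-1)).getD []).foldl solutionStepA (0, none)).1

-- ===== PORT B =====
-- Source B's inner while-loop: pop entries with value ≤ p, accumulating into total and the run count.
def popLoop : List (Int × Int) → Int → Int → Int → (List (Int × Int) × Int × Int)
  | [], _, t, c => ([], t, c)
  | (v, k) :: rest, p, t, c =>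
      if v ≤ p then popLoop rest p (t + (p - v) * k) (c + k)
      else ((v, k) :: rest, t, c)

-- Source B's for-loop body: state = (stack, total), stack head = top of the Python stack.
def solutionStepB (st : List (Int × Int) × Int) (p : Int) : List (Int × Int) × Int :=
  let r := popLoop st.1 p st.2 1
  ((p, r.2.2) :: r.1, r.2.1 + p)

def solution_alt (prices : List Int) : Int :=
  (prices.foldl solutionStepB ([], 0)).2 - prices.sum

-- ===== PRECONDITION & SPEC =====
def Spec_solution (prices : List Int) (out : Int) : Prop := out = solution_alt prices
instance (prices : List Int) (out : Int) : Decidable (Spec_solution prices out) := by unfold Spec_solution; infer_instance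

-- ===== CLAIM (what is proved, stated in full; the proofs are below) =====
def Claim_equal_solution : Prop := ∀ (prices : List Int), Dom_solution prices → Spec_solution prices (solution prices)

-- ===== LEMMAS AND PROOFS =====

-- proof-only characterisation: sMax xs is the suffix-maximum table of xs
def sMax : List Int → List Int
  | [] => []
  | p :: rest =>
    match sMax rest with
    | [] => [p]
    | m :: ms => (max p m) :: m :: ms

lemma sMax_nil_iff (xs : List Int) : sMax xs = [] ↔ xs = [] := by
  cases xs with
  | nil => simp [sMax]
  | cons p rest =>
    simp only [sMax]
    cases sMax rest <;> simp

-- the A-side fold computes (Σ sMax − Σ xs, head of sMax)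
lemma foldlA_inv (xs : List Int) :
    xs.reverse.foldl solutionStepA (0, none) =
      ((sMax xs).sum - xs.sum, (sMax xs).head?) := by
  induction xs with
  | nil => simp [sMax]
  | cons p rest ih =>
    rw [List.reverse_cons, List.foldl_append, ih]
    cases h : sMax rest with
    | nil =>
      have : rest = [] := (sMax_nil_iff rest).1 h
      subst this
      simp [sMax, solutionStepA] at h ⊢
    | cons m ms =>
      simp only [sMax, h, List.head?]
      by_cases hc : p > m
      · simp [solutionStepA, hc, max_eq_left (le_of_lt hc)]
      · rw [not_lt] at hc
        simp only [List.foldl_cons, List.foldl_nil, solutionStepA,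
          if_neg (not_lt.mpr hc), max_eq_right hc, List.sum_cons, Prod.mk.injEq]
        exact ⟨by ring, trivial⟩

-- decode a stack (top first) into the reversed suffix-max table it represents
def dec (stack : List (Int × Int)) : List Int :=
  stack.flatMap (fun q => List.replicate q.2.toNat q.1)

lemma popLoop_key (stack : List (Int × Int)) (p t c : Int)
    (hs : stack.Pairwise (fun a b => a.1 < b.1)) (hpos : ∀ q ∈ stack, 1 ≤ q.2)
    (hc : 0 ≤ c) :
    dec ((p, (popLoop stack p t c).2.2) :: (popLoop stack p t c).1) =
        List.replicate c.toNat p ++ (dec stack).map (fun v => max v p)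
    ∧ (popLoop stack p t c).2.1 =
        t + (((dec stack).map (fun v => max v p)).sum - (dec stack).sum)
    ∧ (popLoop stack p t c).2.2 = c + ((dec stack).length : Int) - ((popLoop stack p t c).1.flatMap (fun q => List.replicate q.2.toNat q.1)).length
    ∧ (∀ q ∈ (popLoop stack p t c).1, p < q.1)
    ∧ (popLoop stack p t c).1.Pairwise (fun a b => a.1 < b.1)
    ∧ (∀ q ∈ (popLoop stack p t c).1, 1 ≤ q.2)
    ∧ c ≤ (popLoop stack p t c).2.2 := by
  induction stack generalizing t c with
  | nil => simp [popLoop, dec]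
  | cons q rest ih =>
    obtain ⟨v, k⟩ := q
    have hk : 1 ≤ k := hpos (v, k) (by simp)
    have hrest_pos : ∀ q ∈ rest, 1 ≤ q.2 := fun q hq => hpos q (by simp [hq])
    have hrest_pw : rest.Pairwise (fun a b => a.1 < b.1) := hs.of_cons
    have hv_lt : ∀ q ∈ rest, v < q.1 := by
      intro q hq; exact (List.pairwise_cons.1 hs).1 q hq
    by_cases hvp : v ≤ p
    · simp only [popLoop, if_pos hvp]
      have := ih (t + (p - v) * k) (c + k) hrest_pw hrest_pos (by omega)
      obtain ⟨h1, h2, h3, h4, h5, h6, h7⟩ := this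
      have hck : (c + k).toNat = c.toNat + k.toNat := by omega
      have hkk : (k.toNat : Int) = k := by omega
      refine ⟨?_, ?_, ?_, h4, h5, h6, by omega⟩
      · rw [h1, hck, List.replicate_add, List.append_assoc]
        congr 1
        simp only [dec, List.flatMap_cons, List.map_append, List.map_replicate,
          max_eq_right hvp]
      · rw [h2]
        simp only [dec, List.flatMap_cons, List.map_append, List.map_replicate,
          List.sum_append, List.sum_replicate, max_eq_right hvp, nsmul_eq_mul, hkk]
        ring
      · rw [h3]
        simp only [dec, List.flatMap_cons, List.length_append, List.length_replicate]
        push_cast [hkk]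
        omega
    · rw [not_le] at hvp
      simp only [popLoop, if_neg (not_le.mpr hvp)]
      have hall : ∀ x ∈ dec ((v, k) :: rest), p < x := by
        intro x hx
        simp only [dec, List.flatMap_cons, List.mem_append, List.mem_replicate] at hx
        rcases hx with ⟨_, rfl⟩ | hx
        · exact hvp
        · simp only [List.mem_flatMap, List.mem_replicate] at hx
          obtain ⟨q, hq, _, rfl⟩ := hx
          exact lt_trans hvp (hv_lt q hq)
      have hmap : (dec ((v, k) :: rest)).map (fun x => max x p) = dec ((v, k) :: rest) := by
        refine (List.map_congr_left ?_).trans (List.map_id _)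
        intro x hx
        exact max_eq_left (le_of_lt (hall x hx))
      refine ⟨?_, ?_, ?_, ?_, hs, hpos, le_refl c⟩
      · simp only [dec, List.flatMap_cons] at hmap ⊢
        rw [hmap]
      · rw [hmap]; ring
      · simp [dec]
      · intro q hq
        rcases List.mem_cons.1 hq with rfl | hq
        · exact hvp
        · exact lt_trans hvp (hv_lt q hq)

-- sMax of a snoc: every entry is maxed with p, then p is appended
lemma sMax_snoc (xs : List Int) (p : Int) :
    sMax (xs ++ [p]) = (sMax xs).map (fun v => max v p) ++ [p] := by
  induction xs with
  | nil => simp [sMax]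
  | cons x rest ih =>
    simp only [List.cons_append, sMax, ih]
    cases h : sMax rest with
    | nil => simp
    | cons m ms =>
      simp [max_assoc]

-- the B-side fold invariant: total = Σ sMax, stack decodes to the reversed sMax table
def InvB (xs : List Int) (st : List (Int × Int) × Int) : Prop :=
  st.2 = (sMax xs).sum ∧ dec st.1 = (sMax xs).reverse ∧
  st.1.Pairwise (fun a b => a.1 < b.1) ∧ ∀ q ∈ st.1, 1 ≤ q.2

lemma stepB_inv (xs : List Int) (p : Int) (st : List (Int × Int) × Int)
    (h : InvB xs st) : InvB (xs ++ [p]) (solutionStepB st p) := by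
  obtain ⟨ht, hd, hpw, hpos⟩ := h
  obtain ⟨h1, h2, _, h4, h5, h6, h7⟩ := popLoop_key st.1 p st.2 1 hpw hpos (by norm_num)
  simp only [solutionStepB, InvB]
  refine ⟨?_, ?_, ?_, ?_⟩
  · rw [h2, ht, sMax_snoc]
    simp only [List.sum_append, List.sum_cons, List.sum_nil, hd]
    rw [List.map_reverse, List.sum_reverse, List.sum_reverse]
    ring
  · show dec ((p, (popLoop st.1 p st.2 1).2.2) :: (popLoop st.1 p st.2 1).1) = _
    rw [h1, hd, sMax_snoc]
    simp [List.reverse_append, List.map_reverse]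
  · exact List.pairwise_cons.2 ⟨h4, h5⟩
  · intro q hq
    rcases List.mem_cons.1 hq with rfl | hq
    · simpa using h7
    · exact h6 q hq

lemma foldlB_inv (xs : List Int) : InvB xs (xs.foldl solutionStepB ([], 0)) := by
  induction xs using List.reverseRecOn with
  | nil => exact ⟨by simp [sMax], by simp [dec, sMax], by simp, by simp⟩
  | append_singleton ys p ih =>
    rw [List.foldl_append, List.foldl_cons, List.foldl_nil]
    exact stepB_inv ys p _ ih

-- ===== VERDICT (by name: the statement is the Claim_ definition above) =====
theorem solution_spec : Claim_equal_solution := by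
  intro prices _
  unfold Spec_solution solution solution_alt
  rw [PySem.List.slice?_none_none_neg_one, Option.getD_some, foldlA_inv]
  have := (foldlB_inv prices).1
  simp only [this]
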